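-- pv_equiv track=rewrite | github.com/lococer/Sqcs | keyCode/pid.py | calSCAC
-- ===== SOURCE A (Python) =====
-- def calSCAC(data):
--     SC = 0x00
--     AC = 0x00
--     for i in range(len(data)):
--         SC += data[i] & 0xFF
--         AC += SC & 0xFF
--         SC &= 0xFF
--         AC &= 0xFF
--     return SC, AC
-- ===== SOURCE B (Python) =====
-- def calSCAC(data):
--     # closed form: SC = total of masked bytes mod 256; AC = weighted sum
--     # sum((n - i) * byte_i) mod 256 (each byte contributes once per remaining step)
--     masked = [b & 0xFF for b in data]
--     n = len(masked)
--     sc = sum(masked) % 256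
--     ac = sum((n - i) * m for i, m in enumerate(masked)) % 256
--     return sc, ac
-- ===== Notes on version B (the rewrite author's own statement) =====
-- stated objective: alternative
-- what changed: Replaces the coupled running-state loop (SC, AC updated together per index) by a closed form: one masking pass, then SC = total mod 256 and AC = an index-weighted sum sum((n-i)*byte_i) mod 256, with no running checksum state.
import Mathlib
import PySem

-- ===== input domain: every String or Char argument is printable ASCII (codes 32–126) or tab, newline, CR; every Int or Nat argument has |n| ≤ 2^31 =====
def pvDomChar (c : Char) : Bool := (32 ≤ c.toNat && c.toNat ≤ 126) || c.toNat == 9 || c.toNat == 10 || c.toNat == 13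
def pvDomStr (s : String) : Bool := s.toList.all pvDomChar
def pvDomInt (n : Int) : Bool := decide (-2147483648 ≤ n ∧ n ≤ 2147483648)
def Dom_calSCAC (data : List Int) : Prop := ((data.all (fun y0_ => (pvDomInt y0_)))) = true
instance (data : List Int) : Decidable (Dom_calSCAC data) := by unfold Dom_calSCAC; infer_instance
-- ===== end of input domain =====

-- B replaces A's coupled running-state loop by a closed form (total mod 256, index-weighted sum mod 256); alternative decomposition, same cost.

-- ===== PORT A =====
def calSCAC (data : List Int) : Int × Int :=
  (PySem.List.pyRange 0 (data.length : Int) 1).foldl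
    (fun (s : Int × Int) i =>
      let SC := s.1 + PySem.Int.band (PySem.List.pyGetD data i 0) 255
      let AC := s.2 + PySem.Int.band SC 255
      (PySem.Int.band SC 255, PySem.Int.band AC 255))
    (0, 0)

-- ===== PORT B =====
def calSCAC_alt (data : List Int) : Int × Int :=
  let masked := data.map (fun b => PySem.Int.band b 255)
  let n : Int := masked.length
  (masked.sum % 256,
   ((PySem.List.enumerate masked 0).map (fun p => (n - p.1) * p.2)).sum % 256)

-- ===== PRECONDITION & SPEC =====
def Spec_calSCAC (data : List Int) (out : Int × Int) : Prop := out = calSCAC_alt data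
instance (data : List Int) (out : Int × Int) : Decidable (Spec_calSCAC data out) := by unfold Spec_calSCAC; infer_instance

-- ===== CLAIM (what is proved, stated in full; the proofs are below) =====
def Claim_equal_calSCAC : Prop := ∀ (data : List Int), Dom_calSCAC data → Spec_calSCAC data (calSCAC data)

-- ===== LEMMAS AND PROOFS =====

-- Python's `x & 0xFF` is `x % 256` on every Int (two's complement).
theorem pv_band255 (a : Int) : PySem.Int.band a 255 = a % 256 := by
  have h255 : Int.toNat 255 = 255 := rfl
  simp only [PySem.Int.band, h255]
  split
  · have h1 : a.toNat &&& 255 = a.toNat % 256 := Nat.and_two_pow_sub_one_eq_mod a.toNat 8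
    omega
  · have h1 : 255 &&& (-a - 1).toNat = (-a - 1).toNat % 256 := by
      rw [Nat.and_comm]; exact Nat.and_two_pow_sub_one_eq_mod _ 8
    omega

-- weighted checksum: each element masked, weighted by its distance to the end (inclusive)
def pvW : List Int → Int
  | [] => 0
  | b :: t => ((t.length : Int) + 1) * (b % 256) + pvW t

-- closed form of A's fold, for an arbitrary starting state
theorem pv_fold_closed (l : List Int) (s a : Int) (hs : s % 256 = s)
    (ha : a % 256 = a) :
    l.foldl (fun (p : Int × Int) b =>
        ((p.1 + b % 256) % 256, (p.2 + (p.1 + b % 256) % 256) % 256)) (s, a)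
      = ((s + (l.map (· % 256)).sum) % 256,
         (a + (l.length : Int) * s + pvW l) % 256) := by
  induction l generalizing s a with
  | nil => simp [pvW, hs, ha]
  | cons b t ih =>
    simp only [List.foldl_cons, List.map_cons, List.sum_cons, List.length_cons, pvW]
    rw [ih _ _ (Int.emod_emod_of_dvd _ dvd_rfl) (Int.emod_emod_of_dvd _ dvd_rfl),
        Prod.mk.injEq]
    constructor
    · omega
    · have ht : (s + b % 256) % 256 ≡ s + b % 256 [ZMOD 256] :=
        Int.emod_emod_of_dvd _ dvd_rfl
      set u := s + b % 256 with hu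
      have h2 : (a + u % 256) % 256 + (t.length : Int) * (u % 256) + pvW t
          ≡ a + u + (t.length : Int) * u + pvW t [ZMOD 256] := by
        have hA : (a + u % 256) % 256 ≡ a + u [ZMOD 256] :=
          (Int.emod_emod_of_dvd _ dvd_rfl).trans ((Int.ModEq.refl a).add ht)
        exact (hA.add (ht.mul_left _)).add_right _
      have h3 : ((a + u % 256) % 256 + (t.length : Int) * (u % 256) + pvW t) % 256
          = (a + u + (t.length : Int) * u + pvW t) % 256 := h2
      rw [h3, hu]
      push_cast
      ring_nf

-- B's enumerate-weighted sum is exactly pvW (after masking)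
theorem pv_enum_sum (l : List Int) (s n : Int) (h : n - s = (l.length : Int)) :
    ((PySem.List.enumerate (l.map (fun b => b % 256)) s).map
        (fun p => (n - p.1) * p.2)).sum = pvW l := by
  induction l generalizing s with
  | nil => simp [PySem.List.enumerate_nil, pvW]
  | cons b t ih =>
    simp only [List.map_cons, PySem.List.enumerate_cons, List.sum_cons, pvW]
    rw [ih (s + 1) (by simp only [List.length_cons] at h; push_cast at h ⊢; omega)]
    have : n - s = (t.length : Int) + 1 := by simp only [List.length_cons] at h; push_cast at h ⊢; omega
    rw [this]

-- ===== VERDICT (by name: the statement is the Claim_ definition above) =====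
theorem calSCAC_spec : Claim_equal_calSCAC := by
  intro data _
  show calSCAC data = calSCAC_alt data
  unfold calSCAC calSCAC_alt
  simp only [pv_band255]
  rw [PySem.List.foldl_pyRange_zero_pyGetD' data 0
      (fun (p : Int × Int) b =>
        ((p.1 + b % 256) % 256, (p.2 + (p.1 + b % 256) % 256) % 256)) (0, 0)]
  rw [pv_fold_closed data 0 0 rfl rfl]
  rw [pv_enum_sum data 0 (((data.map (fun b => b % 256)).length : Int))
      (by simp)]
  simp
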